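-- pv_equiv track=rewrite | github.com/Oleg-YTS/ritual | handlers/morgue.py | find_real_index
-- ===== SOURCE A (Python) =====
-- def find_real_index(bodies, active_index):
--     """Найти реальный индекс тела в списке по индексу активных (без removed)"""
--     ctr = 0
--     for i, b in enumerate(bodies):
--         if not b.get("removed"):
--             if ctr == active_index:
--                 return i
--             ctr += 1
--     return None
-- ===== SOURCE B (Python) =====
-- def find_real_index(bodies, active_index):
--     """Найти реальный индекс тела в списке по индексу активных (без removed)"""
--     if active_index < 0:
--         return None
--     # prefix[i] = number of non-removed bodies among bodies[:i]; it is monotone,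
--     # so the first index where it reaches active_index + 1 is found by binary search.
--     prefix = [0]
--     for b in bodies:
--         prefix.append(prefix[-1] + (0 if b.get("removed") else 1))
--     target = active_index + 1
--     lo, hi = 0, len(bodies)
--     while lo < hi:
--         mid = lo + (hi - lo) // 2
--         if prefix[mid + 1] < target:
--             lo = mid + 1
--         else:
--             hi = mid
--     if lo < len(bodies) and prefix[lo + 1] == target:
--         return lo
--     return None
-- ===== Notes on version B (the rewrite author's own statement) =====
-- stated objective: alternative
-- what changed: B replaces A's short-circuiting counter scan by a prefix-sum table of non-removed counts plus a binary search for the first position where the count reaches active_index+1.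
import Mathlib
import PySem

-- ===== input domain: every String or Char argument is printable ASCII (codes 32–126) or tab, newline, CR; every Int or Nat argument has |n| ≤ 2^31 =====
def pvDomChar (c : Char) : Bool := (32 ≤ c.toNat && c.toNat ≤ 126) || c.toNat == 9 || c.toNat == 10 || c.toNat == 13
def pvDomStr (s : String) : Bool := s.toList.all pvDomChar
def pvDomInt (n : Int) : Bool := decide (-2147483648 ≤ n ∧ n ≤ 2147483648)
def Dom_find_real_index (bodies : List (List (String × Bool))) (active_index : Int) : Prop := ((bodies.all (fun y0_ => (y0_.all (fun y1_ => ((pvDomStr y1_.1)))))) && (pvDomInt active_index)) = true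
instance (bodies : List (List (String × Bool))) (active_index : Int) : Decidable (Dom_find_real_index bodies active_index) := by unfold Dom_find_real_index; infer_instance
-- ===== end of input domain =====

-- B replaces A's counter scan by a prefix-count table plus binary search (objective: alternative algorithm).
-- ===== PORT A =====
-- for i, b in enumerate(bodies): if not b.get("removed"): if ctr == active_index: return i else ctr += 1
def frLoop (rest : List (Int × List (String × Bool))) (ctr active_index : Int) : Option Int :=
  match rest with
  | [] => none
  | (i, b) :: rest =>
    if (b.lookup "removed").getD false = false then
      if ctr = active_index then some i
      else frLoop rest (ctr + 1) active_index
    else frLoop rest ctr active_index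

def find_real_index (bodies : List (List (String × Bool))) (active_index : Int) : Option Int :=
  frLoop (PySem.List.enumerate bodies 0) 0 active_index

-- ===== PORT B =====
-- prefix = [0]; for b in bodies: prefix.append(pre[-1] + (0 if b.get("removed") else 1))
def prefGo (rest : List (List (String × Bool))) (last : Int) : List Int :=
  match rest with
  | [] => []
  | b :: rest =>
    (last + (if (b.lookup "removed").getD false = false then 1 else 0)) ::
      prefGo rest (last + (if (b.lookup "removed").getD false = false then 1 else 0))

-- while lo < hi: mid = lo + (hi - lo) // 2; if prefix[mid+1] < target: lo = mid+1 else hi = mid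
-- (lo, hi, mid are always non-negative in Python, so Nat with Nat division is exact;
--  prefix[mid+1] is always in range in Python, so getElem?.getD 0 is exact there)
def bsearch (pre : List Int) (target : Int) (lo hi : Nat) : Nat :=
  if h : lo < hi then
    if (pre[lo + (hi - lo) / 2 + 1]?).getD 0 < target then
      bsearch pre target (lo + (hi - lo) / 2 + 1) hi
    else
      bsearch pre target lo (lo + (hi - lo) / 2)
  else lo
termination_by hi - lo
decreasing_by all_goals omega

def find_real_index_alt (bodies : List (List (String × Bool))) (active_index : Int) : Option Int :=
  if active_index < 0 then none
  else
    let pre := 0 :: prefGo bodies 0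
    let target := active_index + 1
    let lo := bsearch pre target 0 bodies.length
    if lo < bodies.length ∧ (pre[lo + 1]?).getD 0 = target then some (lo : Int) else none

-- ===== PRECONDITION & SPEC =====
def Spec_find_real_index (bodies : List (List (String × Bool))) (active_index : Int) (out : Option Int) : Prop := out = find_real_index_alt bodies active_index
instance (bodies : List (List (String × Bool))) (active_index : Int) (out : Option Int) : Decidable (Spec_find_real_index bodies active_index out) := by unfold Spec_find_real_index; infer_instance

-- ===== CLAIM (what is proved, stated in full; the proofs are below) =====
def Claim_equal_find_real_index : Prop := ∀ (bodies : List (List (String × Bool))) (active_index : Int), Dom_find_real_index bodies active_index → Spec_find_real_index bodies active_index (find_real_index bodies active_index)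

-- ===== LEMMAS AND PROOFS =====

-- `not b.get("removed")` as a Bool predicate
def nrB (b : List (String × Bool)) : Bool := !((b.lookup "removed").getD false)

-- real positions of the non-removed bodies, as Nats, structurally
def rN : List (List (String × Bool)) → List Nat
  | [] => []
  | b :: t => if nrB b then 0 :: (rN t).map (· + 1) else (rN t).map (· + 1)

-- count of non-removed among the first i bodies
def Pc (bodies : List (List (String × Bool))) (i : Nat) : Nat := (bodies.take i).countP nrB

def realsOf (rest : List (Int × List (String × Bool))) : List Int :=
  rest.filterMap (fun p => if (p.2.lookup "removed").getD false = false then some p.1 else none)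

theorem nrB_iff (b : List (String × Bool)) : nrB b = true ↔ (b.lookup "removed").getD false = false := by
  simp [nrB]

theorem frLoop_eq (rest : List (Int × List (String × Bool))) (ctr ai : Int) (h : ctr ≤ ai) :
    frLoop rest ctr ai = PySem.List.pyGet? (realsOf rest) (ai - ctr) := by
  induction rest generalizing ctr with
  | nil => simp [frLoop, realsOf, PySem.List.pyGet?, PySem.List.pyIdx?]
  | cons p rest ih =>
    obtain ⟨i, b⟩ := p
    by_cases hb : (b.lookup "removed").getD false = false
    · have hr : realsOf ((i, b) :: rest) = i :: realsOf rest := by simp [realsOf, hb]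
      rw [hr]
      simp only [frLoop]
      rw [if_pos hb]
      by_cases hc : ctr = ai
      · subst hc; rw [if_pos rfl, sub_self, PySem.List.pyGet?_zero_cons]
      · rw [if_neg hc, ih (ctr + 1) (by omega)]
        obtain ⟨k, hk⟩ : ∃ k : Nat, ai - (ctr + 1) = (k : Int) := ⟨(ai - (ctr + 1)).toNat, by omega⟩
        rw [hk, show ai - ctr = (k : Int) + 1 from by omega, PySem.List.pyGet?_cons_succ]
    · have hr : realsOf ((i, b) :: rest) = realsOf rest := by simp [realsOf, hb]
      rw [hr]
      simp only [frLoop]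
      rw [if_neg hb, ih ctr h]

theorem frLoop_neg (rest : List (Int × List (String × Bool))) (ctr ai : Int) (h : ai < ctr) :
    frLoop rest ctr ai = none := by
  induction rest generalizing ctr with
  | nil => rfl
  | cons p rest ih =>
    obtain ⟨i, b⟩ := p
    simp only [frLoop]
    split_ifs with hb hc
    · omega
    · exact ih (ctr + 1) (by omega)
    · exact ih ctr h

-- realsOf of the enumeration is the Nat position list, shifted by the start
theorem realsOf_enum (bodies : List (List (String × Bool))) (s : Int) :
    realsOf (PySem.List.enumerate bodies s) = (rN bodies).map (fun n : Nat => s + (n : Int)) := by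
  induction bodies generalizing s with
  | nil => simp [realsOf, rN, PySem.List.enumerate_nil]
  | cons b t ih =>
    rw [PySem.List.enumerate_cons]
    have tail : realsOf ((s, b) :: PySem.List.enumerate t (s + 1)) =
        (if (b.lookup "removed").getD false = false then [s] else []) ++
          realsOf (PySem.List.enumerate t (s + 1)) := by
      by_cases hb : (b.lookup "removed").getD false = false <;> simp [realsOf, hb]
    rw [tail, ih (s + 1)]
    have hmap : ∀ L : List Nat, (L.map (· + 1)).map (fun n : Nat => s + (n : Int)) =
        L.map (fun n : Nat => s + 1 + (n : Int)) := by
      intro L; rw [List.map_map]; apply List.map_congr_left; intro x _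
      simp only [Function.comp]; push_cast; ring
    by_cases hb : (b.lookup "removed").getD false = false
    · have hn : nrB b = true := (nrB_iff b).mpr hb
      rw [if_pos hb]
      simp only [rN, hn, if_true, List.map_cons, hmap, List.cons_append, List.nil_append]
      norm_num
    · have hn : nrB b = false := by
        cases hv : (b.lookup "removed").getD false
        · exact absurd hv hb
        · simp [nrB, hv]
      rw [if_neg hb]
      simp only [rN, hn, Bool.false_eq_true, if_false, hmap, List.nil_append]

theorem rN_length (bodies : List (List (String × Bool))) : (rN bodies).length = bodies.countP nrB := by
  induction bodies with
  | nil => rfl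
  | cons b t ih => by_cases hb : nrB b <;> simp [rN, hb, ih]

theorem Pc_zero (bodies : List (List (String × Bool))) : Pc bodies 0 = 0 := rfl

theorem Pc_cons (b : List (String × Bool)) (t : List (List (String × Bool))) (i : Nat) :
    Pc (b :: t) (i + 1) = (if nrB b then 1 else 0) + Pc t i := by
  simp [Pc, List.countP_cons]; cases nrB b <;> simp <;> omega

theorem rN_get (bodies : List (List (String × Bool))) (k i : Nat) :
    (rN bodies)[k]? = some i ↔ ∃ h : i < bodies.length, nrB bodies[i] ∧ Pc bodies i = k := by
  induction bodies generalizing k i with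
  | nil => simp [rN]
  | cons b t ih =>
    by_cases hb : nrB b
    · simp only [rN, hb, if_true]
      match k, i with
      | 0, 0 => simp [hb, Pc]
      | 0, i + 1 =>
        simp only [List.getElem?_cons_zero, Option.some.injEq]
        constructor
        · intro h; omega
        · rintro ⟨h, -, hp⟩
          rw [Pc_cons, hb] at hp; simp at hp
      | k + 1, 0 =>
        simp only [List.getElem?_cons_succ, List.getElem?_map]
        constructor
        · intro h
          rcases hx : (rN t)[k]? with _ | x <;> rw [hx] at h <;> simp at h
        · rintro ⟨h, -, hp⟩
          rw [Pc_zero] at hp; omega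
      | k + 1, i + 1 =>
        simp only [List.getElem?_cons_succ, List.getElem?_map, List.length_cons,
          List.getElem_cons_succ, Pc_cons, hb, if_true]
        rw [show ∀ o : Option Nat, o.map (· + 1) = some (i + 1) ↔ o = some i from by
          rintro (_ | x) <;> simp]
        rw [ih]
        constructor
        · rintro ⟨h, h1, h2⟩; exact ⟨by omega, h1, by omega⟩
        · rintro ⟨h, h1, h2⟩; exact ⟨by omega, h1, by omega⟩
    · simp only [Bool.not_eq_true] at hb
      simp only [rN, hb, Bool.false_eq_true, if_false, List.getElem?_map]
      rw [show ∀ o : Option Nat, o.map (· + 1) = some i ↔ ∃ i', o = some i' ∧ i = i' + 1 from by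
        rintro (_ | x) <;> simp [eq_comm]]
      constructor
      · rintro ⟨i', hi', rfl⟩
        obtain ⟨h, h1, h2⟩ := (ih k i').mp hi'
        refine ⟨by simpa using Nat.succ_lt_succ h, by simpa using h1, ?_⟩
        rw [Pc_cons, hb]; simpa using h2
      · rintro ⟨h, h1, h2⟩
        match i with
        | 0 => simp at h1; rw [h1] at hb; simp at hb
        | i + 1 =>
          refine ⟨i, ?_, rfl⟩
          rw [Pc_cons, hb] at h2; simp at h2
          exact (ih k i).mpr ⟨by simpa using h, by simpa using h1, h2⟩

theorem Pc_succ (bodies : List (List (String × Bool))) (i : Nat) (h : i < bodies.length) :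
    Pc bodies (i + 1) = Pc bodies i + (if nrB bodies[i] then 1 else 0) := by
  induction bodies generalizing i with
  | nil => simp at h
  | cons b t ih =>
    match i with
    | 0 => rw [Pc_cons]; simp [Pc]
    | i + 1 =>
      rw [Pc_cons, Pc_cons, ih i (by simpa using h)]
      simp only [List.getElem_cons_succ]
      have hlt : i < t.length := by simpa using h
      by_cases hb2 : nrB (t[i]'hlt) = true <;> simp [hb2] <;> omega

theorem Pc_mono (bodies : List (List (String × Bool))) (i j : Nat) (h : i ≤ j) :
    Pc bodies i ≤ Pc bodies j := by
  unfold Pc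
  have hs : List.Sublist (bodies.take i) (bodies.take j) := by
    have ht := List.take_sublist i (bodies.take j)
    rwa [List.take_take, min_eq_left h] at ht
  exact hs.countP_le

theorem Pc_top (bodies : List (List (String × Bool))) : Pc bodies bodies.length = bodies.countP nrB := by
  simp [Pc]

theorem ind_cast (b : List (String × Bool)) :
    (if (b.lookup "removed").getD false = false then (1 : Int) else 0) =
      ((if nrB b then 1 else 0 : Nat) : Int) := by
  by_cases hb : (b.lookup "removed").getD false = false
  · rw [if_pos hb, if_pos ((nrB_iff b).mpr hb)]; rfl
  · have hn : nrB b = false := by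
      cases hv : (b.lookup "removed").getD false
      · exact absurd hv hb
      · simp [nrB, hv]
    rw [if_neg hb, hn]; rfl

theorem prefGo_get (bodies : List (List (String × Bool))) (last : Int) (j : Nat) (h : j < bodies.length) :
    (prefGo bodies last)[j]? = some (last + (Pc bodies (j + 1) : Int)) := by
  induction bodies generalizing last j with
  | nil => simp at h
  | cons b t ih =>
    match j with
    | 0 =>
      show some _ = some _
      rw [Option.some.injEq, ind_cast, Pc_cons, Pc_zero]
      push_cast; ring
    | j + 1 =>
      show (prefGo t _)[j]? = _
      rw [ih _ j (by simpa using h), Option.some.injEq, Pc_cons, ind_cast]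
      push_cast; ring

-- the prefix list entry is the prefix count, for indices in range
theorem pref_get (bodies : List (List (String × Bool))) (j : Nat) (h : j ≤ bodies.length) :
    ((0 :: prefGo bodies 0)[j]?).getD 0 = (Pc bodies j : Int) := by
  match j with
  | 0 => simp [Pc_zero]
  | j + 1 =>
    show ((prefGo bodies 0)[j]?).getD 0 = _
    rw [prefGo_get bodies 0 j (by omega)]
    simp

theorem bsearch_spec (L : List Int) (t : Int) (n : Nat)
    (mono : ∀ i j : Nat, i ≤ j → j < n → t ≤ (L[i + 1]?).getD 0 → t ≤ (L[j + 1]?).getD 0) :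
    ∀ d lo hi : Nat, hi - lo ≤ d → lo ≤ hi → hi ≤ n →
      (∀ j : Nat, j < lo → ¬ t ≤ (L[j + 1]?).getD 0) →
      (hi < n → t ≤ (L[hi + 1]?).getD 0) →
      lo ≤ bsearch L t lo hi ∧ bsearch L t lo hi ≤ hi ∧
        (∀ j : Nat, j < bsearch L t lo hi → ¬ t ≤ (L[j + 1]?).getD 0) ∧
        (bsearch L t lo hi < n → t ≤ (L[bsearch L t lo hi + 1]?).getD 0) := by
  intro d
  induction d using Nat.strong_induction_on with
  | _ d ih =>
    intro lo hi hd hlh hhn hbelow habove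
    by_cases h : lo < hi
    · rw [bsearch, dif_pos h]
      by_cases hmid : (L[lo + (hi - lo) / 2 + 1]?).getD 0 < t
      · rw [if_pos hmid]
        have hres := ih (hi - (lo + (hi - lo) / 2 + 1)) (by omega)
          (lo + (hi - lo) / 2 + 1) hi (by omega) (by omega) hhn
          (fun j hj => by
            by_cases hjlo : j < lo
            · exact hbelow j hjlo
            · intro hp
              exact absurd (mono j (lo + (hi - lo) / 2) (by omega) (by omega) hp) (by omega)) habove
        exact ⟨by omega, hres.2.1, hres.2.2⟩
      · rw [if_neg hmid]
        have hres := ih ((lo + (hi - lo) / 2) - lo) (by omega)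
          lo (lo + (hi - lo) / 2) (by omega) (by omega) (by omega) hbelow
          (fun _ => by omega)
        exact ⟨hres.1, by omega, hres.2.2⟩
    · rw [bsearch, dif_neg h]
      have : lo = hi := by omega
      subst this
      exact ⟨le_refl _, le_refl _, hbelow, habove⟩ 

-- ===== VERDICT (by name: the statement is the Claim_ definition above) =====
theorem assemble (bodies : List (List (String × Bool))) (k : Nat) (r : Nat)
    (hrn : r ≤ bodies.length)
    (hbel : ∀ j : Nat, j < r → ¬ ((k : Int) + 1) ≤ (((0 :: prefGo bodies 0))[j + 1]?).getD 0)
    (habv : r < bodies.length → ((k : Int) + 1) ≤ (((0 :: prefGo bodies 0))[r + 1]?).getD 0) :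
    PySem.List.pyGet? (realsOf (PySem.List.enumerate bodies 0)) (k : Int) =
      (if r < bodies.length ∧ (((0 :: prefGo bodies 0))[r + 1]?).getD 0 = (k : Int) + 1
        then some ((r : Nat) : Int) else none) := by
  rw [realsOf_enum, PySem.List.pyGet?_of_nonneg _ (by omega), List.getElem?_map, Int.toNat_natCast]
  by_cases hc : k < bodies.countP nrB
  · have hlen : k < (rN bodies).length := by rw [rN_length]; exact hc
    have hsome : (rN bodies)[k]? = some ((rN bodies)[k]'hlen) := List.getElem?_eq_getElem hlen
    obtain ⟨hi_lt, hi_nr, hi_pc⟩ := (rN_get bodies k ((rN bodies)[k]'hlen)).mp hsome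
    have hpred_i : ((k : Int) + 1) ≤ (((0 :: prefGo bodies 0))[(rN bodies)[k]'hlen + 1]?).getD 0 := by
      rw [pref_get _ _ (by omega), Pc_succ _ _ hi_lt]
      simp only [hi_nr, if_true]
      omega
    have hri : r ≤ (rN bodies)[k]'hlen := by
      by_contra hri
      exact hbel _ (by omega) hpred_i
    have hrn' : r < bodies.length := by omega
    have hpr := habv hrn'
    rw [pref_get _ _ (by omega)] at hpr
    have hPr0 : Pc bodies r ≤ k := by
      match hrv : r with
      | 0 => simp [Pc_zero]
      | r' + 1 =>
        have hb' := hbel r' (by omega)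
        rw [pref_get _ _ (by omega)] at hb'
        omega
    have hstep := Pc_succ bodies r hrn'
    have hnrr : nrB (bodies[r]'hrn') = true := by
      cases hx : nrB (bodies[r]'hrn')
      · simp only [hx, Bool.false_eq_true, if_false] at hstep; omega
      · rfl
    have hstep1 : Pc bodies (r + 1) = Pc bodies r + 1 := by
      rw [hstep, hnrr]; simp
    clear hstep
    have hPcr : Pc bodies r = k := by omega
    have hsr : (rN bodies)[k]? = some r := (rN_get bodies k r).mpr ⟨hrn', hnrr, hPcr⟩
    have hir : (rN bodies)[k]'hlen = r := by
      rw [hsome, Option.some.injEq] at hsr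
      exact hsr
    rw [hsome, if_pos ⟨hrn', by rw [pref_get _ _ (by omega), hstep1]; omega⟩]
    simp only [Option.map_some, Option.some.injEq]
    rw [hir]
    omega
  · have hnone : (rN bodies)[k]? = none := by
      rw [List.getElem?_eq_none]
      rw [rN_length]; omega
    rw [hnone]
    have hreq : r = bodies.length := by
      by_contra hne
      have hlt : r < bodies.length := by omega
      have hv := habv hlt
      rw [pref_get _ _ (by omega)] at hv
      have hle := Pc_mono bodies (r + 1) bodies.length (by omega)
      rw [Pc_top] at hle
      omega
    rw [if_neg (by rintro ⟨h1, -⟩; omega)]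
    rfl

theorem find_real_index_spec : Claim_equal_find_real_index := by
  intro bodies ai _
  unfold Spec_find_real_index find_real_index find_real_index_alt
  by_cases h0 : ai < 0
  · rw [if_pos h0, frLoop_neg _ 0 ai (by omega)]
  · rw [if_neg h0]
    obtain ⟨k, rfl⟩ : ∃ k : Nat, ai = (k : Int) := ⟨ai.toNat, (Int.toNat_of_nonneg (by omega)).symm⟩
    show frLoop (PySem.List.enumerate bodies 0) 0 (k : Int) =
      if bsearch (0 :: prefGo bodies 0) ((k : Int) + 1) 0 bodies.length < bodies.length ∧
          (((0 :: prefGo bodies 0))[bsearch (0 :: prefGo bodies 0) ((k : Int) + 1) 0 bodies.length + 1]?).getD 0 = (k : Int) + 1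
        then some ((bsearch (0 :: prefGo bodies 0) ((k : Int) + 1) 0 bodies.length : Nat) : Int) else none
    have mono : ∀ i j : Nat, i ≤ j → j < bodies.length →
        ((k : Int) + 1) ≤ (((0 :: prefGo bodies 0))[i + 1]?).getD 0 →
        ((k : Int) + 1) ≤ (((0 :: prefGo bodies 0))[j + 1]?).getD 0 := by
      intro i j hij hj hp
      rw [pref_get _ _ (by omega)] at hp ⊢
      have := Pc_mono bodies (i + 1) (j + 1) (by omega)
      omega
    obtain ⟨-, hrn, hbel, habv⟩ :=
      bsearch_spec (0 :: prefGo bodies 0) ((k : Int) + 1) bodies.length mono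
        bodies.length 0 bodies.length (by omega) (by omega) (le_refl _)
        (fun j hj => absurd hj (Nat.not_lt_zero j)) (fun h => absurd h (lt_irrefl _))
    rw [frLoop_eq _ 0 (k : Int) (by omega), sub_zero]
    exact assemble bodies k _ hrn hbel habv
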